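-- pv_equiv track=rewrite | github.com/muhammadazmi26/Naive-Bayes | Metode_Naive_Bayes.py | mencari_jumlah_kasus_sama
-- ===== SOURCE A (Python) =====
-- def cek_kasus_sama_dgn_klas(isi_atribut_apa, dataset, isi_label_apa) :  # "raini | yes" , ada berapa?
--     jumlah = 0
--     for i in range(len(dataset)):
--         apakah_ada = isi_atribut_apa in dataset[i] and isi_label_apa in dataset[i]
--         if apakah_ada == True :
--             jumlah = jumlah + 1
--
--     return jumlah
--
-- def mencari_jumlah_kasus_sama(data_uji, dataset, isi_label) :
--     hasil_jumlah_kasus_sama = []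
--     for i in range(len(data_uji)) :
--         tampung = []
--         for j in range(len(isi_label)):
--             tampung.append(cek_kasus_sama_dgn_klas(data_uji[i], dataset, isi_label[j]))
--
--         hasil_jumlah_kasus_sama.append(tampung)
--
--     # print "DATA KASUS YANG SAMA : ", hasil_jumlah_kasus_sama
--     return hasil_jumlah_kasus_sama
-- ===== SOURCE B (Python) =====
-- def mencari_jumlah_kasus_sama(data_uji, dataset, isi_label):
--     # Convert each row to a set once, and filter the rows containing each test
--     # value once, instead of rescanning the whole dataset for every (value, label) pair.
--     rowsets = [set(row) for row in dataset]
--     hasil = []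
--     for u in data_uji:
--         with_u = [s for s in rowsets if u in s]
--         hasil.append([sum(1 for s in with_u if l in s) for l in isi_label])
--     return hasil
-- ===== Notes on version B (the rewrite author's own statement) =====
-- stated objective: faster
-- what changed: B converts every dataset row to a set once and, per test value, filters the rows containing it once, then only counts labels inside that filtered list, instead of rescanning the whole dataset with linear membership tests for every (value,label) pair.
import Mathlib
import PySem

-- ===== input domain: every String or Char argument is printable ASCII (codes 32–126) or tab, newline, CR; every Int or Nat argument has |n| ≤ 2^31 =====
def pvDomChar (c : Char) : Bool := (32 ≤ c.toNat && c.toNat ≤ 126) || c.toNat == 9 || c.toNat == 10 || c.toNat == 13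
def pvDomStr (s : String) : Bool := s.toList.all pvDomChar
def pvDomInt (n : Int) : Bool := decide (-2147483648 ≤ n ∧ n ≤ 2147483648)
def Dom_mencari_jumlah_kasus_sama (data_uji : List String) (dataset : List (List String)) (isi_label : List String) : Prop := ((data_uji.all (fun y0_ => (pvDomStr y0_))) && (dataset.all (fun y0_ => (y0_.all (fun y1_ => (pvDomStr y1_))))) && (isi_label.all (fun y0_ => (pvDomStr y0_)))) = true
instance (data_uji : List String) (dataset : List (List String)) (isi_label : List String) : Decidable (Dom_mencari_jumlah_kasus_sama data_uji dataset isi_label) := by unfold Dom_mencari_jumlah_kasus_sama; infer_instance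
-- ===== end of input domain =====

-- B converts each row to a set once and filters the rows containing each test value once,
-- instead of rescanning the whole dataset for every (value, label) pair; objective: faster.

-- ===== PORT A =====
def cek_kasus_sama_dgn_klas (isi_atribut_apa : String) (dataset : List (List String)) (isi_label_apa : String) : Int :=
  (PySem.List.pyRange 0 (dataset.length : Int) 1).foldl
    (fun jumlah i =>
      let row := PySem.List.pyGetD dataset i []
      let apakah_ada := row.contains isi_atribut_apa && row.contains isi_label_apa
      if apakah_ada then jumlah + 1 else jumlah) 0

def mencari_jumlah_kasus_sama (data_uji : List String) (dataset : List (List String)) (isi_label : List String) : List (List Int) :=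
  (PySem.List.pyRange 0 (data_uji.length : Int) 1).foldl
    (fun hasil i =>
      let tampung := (PySem.List.pyRange 0 (isi_label.length : Int) 1).foldl
        (fun t j =>
          t ++ [cek_kasus_sama_dgn_klas (PySem.List.pyGetD data_uji i "") dataset (PySem.List.pyGetD isi_label j "")]) []
      hasil ++ [tampung]) []

-- ===== PORT B =====
def mencari_jumlah_kasus_sama_alt (data_uji : List String) (dataset : List (List String)) (isi_label : List String) : List (List Int) :=
  let rowsets : List (PySem.Set String) := dataset.map (fun row => PySem.Set.ofList row)
  data_uji.map (fun u =>
    let with_u := rowsets.filter (fun s => PySem.Set.contains s u)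
    isi_label.map (fun l => ((with_u.countP (fun s => PySem.Set.contains s l) : Nat) : Int)))

-- ===== PRECONDITION & SPEC =====
def Spec_mencari_jumlah_kasus_sama (data_uji : List String) (dataset : List (List String)) (isi_label : List String) (out : List (List Int)) : Prop := out = mencari_jumlah_kasus_sama_alt data_uji dataset isi_label
instance (data_uji : List String) (dataset : List (List String)) (isi_label : List String) (out : List (List Int)) : Decidable (Spec_mencari_jumlah_kasus_sama data_uji dataset isi_label out) := by unfold Spec_mencari_jumlah_kasus_sama; infer_instance

-- ===== CLAIM (what is proved, stated in full; the proofs are below) =====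
def Claim_equal_mencari_jumlah_kasus_sama : Prop := ∀ (data_uji : List String) (dataset : List (List String)) (isi_label : List String), Dom_mencari_jumlah_kasus_sama data_uji dataset isi_label → Spec_mencari_jumlah_kasus_sama data_uji dataset isi_label (mencari_jumlah_kasus_sama data_uji dataset isi_label)

-- ===== LEMMAS AND PROOFS =====

-- A's counting helper equals B's filter-then-count of the row sets.
theorem cek_eq (u : String) (dataset : List (List String)) (l : String) :
    cek_kasus_sama_dgn_klas u dataset l =
      ((((dataset.map (fun row => PySem.Set.ofList row)).filter
          (fun s => PySem.Set.contains s u)).countP (fun s => PySem.Set.contains s l) : Nat) : Int) := by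
  unfold cek_kasus_sama_dgn_klas
  show (PySem.List.pyRange 0 (dataset.length : Int) 1).foldl
      (fun jumlah i => if (PySem.List.pyGetD dataset i []).contains u && (PySem.List.pyGetD dataset i []).contains l then jumlah + 1 else jumlah) 0 = _
  rw [PySem.List.foldl_pyRange_zero_pyGetD' dataset []
      (fun jumlah row => if row.contains u && row.contains l then jumlah + 1 else jumlah) 0]
  rw [PySem.List.foldl_if_add_one]
  rw [List.countP_filter, List.countP_map]
  rw [Int.zero_add]
  congr 1
  apply List.countP_congr
  intro row _
  simp [PySem.Set.mem_ofList, Bool.and_comm]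

-- ===== VERDICT (by name: the statement is the Claim_ definition above) =====
theorem mencari_jumlah_kasus_sama_spec : Claim_equal_mencari_jumlah_kasus_sama := by
  intro data_uji dataset isi_label _
  unfold Spec_mencari_jumlah_kasus_sama mencari_jumlah_kasus_sama mencari_jumlah_kasus_sama_alt
  simp only [PySem.List.foldl_append_singleton_eq_map, List.nil_append]
  rw [show (fun i => (PySem.List.pyRange 0 (isi_label.length : Int) 1).map
        (fun j => cek_kasus_sama_dgn_klas (PySem.List.pyGetD data_uji i "") dataset (PySem.List.pyGetD isi_label j "")))
      = (fun u => (PySem.List.pyRange 0 (isi_label.length : Int) 1).map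
        (fun j => cek_kasus_sama_dgn_klas u dataset (PySem.List.pyGetD isi_label j ""))) ∘ (fun i => PySem.List.pyGetD data_uji i "")
      from rfl]
  rw [← List.map_map, PySem.List.map_pyGetD_pyRange_zero']
  apply List.map_congr_left
  intro u _
  rw [show (fun j => cek_kasus_sama_dgn_klas u dataset (PySem.List.pyGetD isi_label j ""))
      = (fun l => cek_kasus_sama_dgn_klas u dataset l) ∘ (fun j => PySem.List.pyGetD isi_label j "") from rfl]
  rw [← List.map_map, PySem.List.map_pyGetD_pyRange_zero']
  apply List.map_congr_left
  intro l _
  exact cek_eq u dataset l
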